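-- pv_equiv track=rewrite | github.com/Yashwanth-AL/Test_Case_Generator | backend/app/ml/test_case_generator.py | _generate_contextual_results
-- ===== SOURCE A (Python) =====
-- from typing import List, Optional, Dict
--
-- def _generate_contextual_results(
--
--     action: str,
--     subject: str,
--     device: str,
--     steps: List[str],
-- ) -> List[str]:
--     """Generate expected results mapped 1-to-1 with contextual steps"""
--     d = device if device else "the system"
--     s = subject if subject else "the feature"
--     results = []
--     for step in steps:
--         sl = step.lower()
--         if "log in" in sl or "login" in sl:
--             results.append(f"Login successful; {d} interface is accessible")
--         elif "navigate" in sl: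
--             results.append(f"Requested section / page displayed correctly")
--         elif "enable" in sl:
--             results.append(f"{s} is enabled successfully")
--         elif "disable" in sl:
--             results.append(f"{s} is disabled successfully")
--         elif "review" in sl or "check" in sl:
--             results.append(f"Current {s} settings are visible and readable")
--         elif "set " in sl or "configure" in sl:
--             results.append(f"{s} parameters are configured correctly")
--         elif "apply" in sl or "save" in sl:
--             results.append(f"Configuration saved without errors")
--         elif "verify" in sl:
--             results.append(f"{s} is verified and meets requirements")
--         elif "validate" in sl or "test" in sl:
--             results.append(f"{s} passes validation / test")
--         elif "upload" in sl:
--             results.append(f"File uploaded to {d} successfully")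
--         elif "obtain" in sl or "download" in sl:
--             results.append(f"File obtained / downloaded successfully")
--         elif "initiate" in sl or "start" in sl:
--             results.append(f"Process initiated successfully")
--         elif "wait" in sl:
--             results.append(f"Process completes within expected time")
--         elif "confirm" in sl:
--             results.append(f"{s} confirmed functioning correctly")
--         elif "simulate" in sl:
--             results.append(f"Simulated condition triggered as expected")
--         elif "document" in sl:
--             results.append(f"Test results documented accurately")
--         elif "monitor" in sl:
--             results.append(f"Monitoring data captured and displayed correctly")
--         elif "send" in sl:
--             results.append(f"{s} responds correctly to the test request")
--         else:
--             results.append(f"{s} operation completed successfully")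
--     return results
-- ===== SOURCE B (Python) =====
-- from typing import List
--
-- # Keywords tagged with the priority (branch index) of the message they trigger;
-- # smaller priority wins. 18 = default message.
-- KEYWORDS = [
--     ("log in", 0), ("login", 0), ("navigate", 1), ("enable", 2), ("disable", 3),
--     ("review", 4), ("check", 4), ("set ", 5), ("configure", 5), ("apply", 6),
--     ("save", 6), ("verify", 7), ("validate", 8), ("test", 8), ("upload", 9),
--     ("obtain", 10), ("download", 10), ("initiate", 11), ("start", 11),
--     ("wait", 12), ("confirm", 13), ("simulate", 14), ("document", 15),
--     ("monitor", 16), ("send", 17),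
-- ]
--
--
-- def _generate_contextual_results(action, subject, device, steps):
--     d = device if device else "the system"
--     s = subject if subject else "the feature"
--     outputs = [
--         f"Login successful; {d} interface is accessible",
--         "Requested section / page displayed correctly",
--         f"{s} is enabled successfully",
--         f"{s} is disabled successfully",
--         f"Current {s} settings are visible and readable",
--         f"{s} parameters are configured correctly",
--         "Configuration saved without errors",
--         f"{s} is verified and meets requirements",
--         f"{s} passes validation / test",
--         f"File uploaded to {d} successfully",
--         "File obtained / downloaded successfully",
--         "Process initiated successfully",
--         "Process completes within expected time",
--         f"{s} confirmed functioning correctly",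
--         "Simulated condition triggered as expected",
--         "Test results documented accurately",
--         "Monitoring data captured and displayed correctly",
--         f"{s} responds correctly to the test request",
--         f"{s} operation completed successfully",
--     ]
--     results = []
--     for step in steps:
--         sl = step.lower()
--         best = 18
--         # one left-to-right scan: at each position, any keyword starting there
--         # lowers 'best' to its priority (naive multi-pattern matching)
--         for i in range(len(sl)):
--             for kw, p in KEYWORDS:
--                 if p < best and sl.startswith(kw, i):
--                     best = p
--         results.append(outputs[best])
--     return results
-- ===== Notes on version B (the rewrite author's own statement) =====
-- stated objective: alternative
-- what changed: Replaced A's ordered 18-branch if/elif chain of substring tests with a naive multi-pattern matcher: one positional scan of the lowercased step that takes the minimum priority among all keywords starting at any position, then indexes a pre-rendered outputs table.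
import Mathlib
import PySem

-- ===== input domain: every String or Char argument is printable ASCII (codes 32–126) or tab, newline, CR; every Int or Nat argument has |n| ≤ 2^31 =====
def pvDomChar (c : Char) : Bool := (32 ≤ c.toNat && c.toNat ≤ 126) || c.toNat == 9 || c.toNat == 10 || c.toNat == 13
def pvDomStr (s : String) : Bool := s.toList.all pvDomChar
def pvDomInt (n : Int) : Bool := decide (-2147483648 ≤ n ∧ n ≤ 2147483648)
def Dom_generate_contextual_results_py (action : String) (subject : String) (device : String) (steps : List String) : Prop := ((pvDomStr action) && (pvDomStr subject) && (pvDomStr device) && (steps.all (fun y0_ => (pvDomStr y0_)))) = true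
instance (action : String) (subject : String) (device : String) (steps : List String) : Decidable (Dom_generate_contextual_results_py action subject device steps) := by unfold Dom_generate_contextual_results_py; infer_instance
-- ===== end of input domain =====

-- B replaces A's ordered 18-branch if/elif chain of substring tests by a naive
-- multi-pattern matcher: one positional scan of the lowercased step taking the
-- minimum priority among all keywords starting at any position, then an indexed
-- lookup in a pre-rendered outputs table (objective: alternative; same cost).

-- ===== PORT A =====
-- per-step if/elif chain of A, extracted as a helper (A's loop calls it)
def pvStepA (s d : String) (step : String) : String :=
  let sl := PySem.Str.lower step
  if PySem.Str.isIn "log in" sl || PySem.Str.isIn "login" sl then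
    "Login successful; " ++ d ++ " interface is accessible"
  else if PySem.Str.isIn "navigate" sl then
    "Requested section / page displayed correctly"
  else if PySem.Str.isIn "enable" sl then
    s ++ " is enabled successfully"
  else if PySem.Str.isIn "disable" sl then
    s ++ " is disabled successfully"
  else if PySem.Str.isIn "review" sl || PySem.Str.isIn "check" sl then
    "Current " ++ s ++ " settings are visible and readable"
  else if PySem.Str.isIn "set " sl || PySem.Str.isIn "configure" sl then
    s ++ " parameters are configured correctly"
  else if PySem.Str.isIn "apply" sl || PySem.Str.isIn "save" sl then
    "Configuration saved without errors"
  else if PySem.Str.isIn "verify" sl then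
    s ++ " is verified and meets requirements"
  else if PySem.Str.isIn "validate" sl || PySem.Str.isIn "test" sl then
    s ++ " passes validation / test"
  else if PySem.Str.isIn "upload" sl then
    "File uploaded to " ++ d ++ " successfully"
  else if PySem.Str.isIn "obtain" sl || PySem.Str.isIn "download" sl then
    "File obtained / downloaded successfully"
  else if PySem.Str.isIn "initiate" sl || PySem.Str.isIn "start" sl then
    "Process initiated successfully"
  else if PySem.Str.isIn "wait" sl then
    "Process completes within expected time"
  else if PySem.Str.isIn "confirm" sl then
    s ++ " confirmed functioning correctly"
  else if PySem.Str.isIn "simulate" sl then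
    "Simulated condition triggered as expected"
  else if PySem.Str.isIn "document" sl then
    "Test results documented accurately"
  else if PySem.Str.isIn "monitor" sl then
    "Monitoring data captured and displayed correctly"
  else if PySem.Str.isIn "send" sl then
    s ++ " responds correctly to the test request"
  else
    s ++ " operation completed successfully"

def generate_contextual_results_py (action : String) (subject : String) (device : String) (steps : List String) : List String :=
  let d := if device = "" then "the system" else device
  let s := if subject = "" then "the feature" else subject
  steps.foldl (fun results step => results ++ [pvStepA s d step]) []

-- ===== PORT B =====
-- KEYWORDS of Source B: (keyword, priority); smaller priority wins, 18 = default
def pvKeywords : List (String × Nat) :=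
  [ ("log in", 0), ("login", 0), ("navigate", 1), ("enable", 2), ("disable", 3)
  , ("review", 4), ("check", 4), ("set ", 5), ("configure", 5), ("apply", 6)
  , ("save", 6), ("verify", 7), ("validate", 8), ("test", 8), ("upload", 9)
  , ("obtain", 10), ("download", 10), ("initiate", 11), ("start", 11)
  , ("wait", 12), ("confirm", 13), ("simulate", 14), ("document", 15)
  , ("monitor", 16), ("send", 17) ]

-- outputs table of Source B (19 pre-rendered messages)
def pvOutputs (s d : String) : List String :=
  [ "Login successful; " ++ d ++ " interface is accessible"
  , "Requested section / page displayed correctly"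
  , s ++ " is enabled successfully"
  , s ++ " is disabled successfully"
  , "Current " ++ s ++ " settings are visible and readable"
  , s ++ " parameters are configured correctly"
  , "Configuration saved without errors"
  , s ++ " is verified and meets requirements"
  , s ++ " passes validation / test"
  , "File uploaded to " ++ d ++ " successfully"
  , "File obtained / downloaded successfully"
  , "Process initiated successfully"
  , "Process completes within expected time"
  , s ++ " confirmed functioning correctly"
  , "Simulated condition triggered as expected"
  , "Test results documented accurately"
  , "Monitoring data captured and displayed correctly"
  , s ++ " responds correctly to the test request"
  , s ++ " operation completed successfully" ]

-- Source B's double loop: for i in range(len(sl)): for kw, p in KEYWORDS: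
--   if p < best and sl.startswith(kw, i): best = p
-- sl.startswith(kw, i) with 0 ≤ i is exactly startswith on the drop-i suffix.
def pvBest (sl : List Char) : Nat :=
  (List.range sl.length).foldl
    (fun best i =>
      pvKeywords.foldl
        (fun b kp =>
          if kp.2 < b ∧ PySem.Chars.startswith (sl.drop i) kp.1.toList = true then kp.2 else b)
        best)
    18

-- outputs[best]: best ≤ 18 < len(outputs) always, so the getD default "" is never used
def pvStepB (s d : String) (step : String) : String :=
  (PySem.List.pyGet? (pvOutputs s d) ((pvBest (PySem.Str.lower step).toList : Nat) : Int)).getD ""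

def generate_contextual_results_py_alt (action : String) (subject : String) (device : String) (steps : List String) : List String :=
  let d := if device = "" then "the system" else device
  let s := if subject = "" then "the feature" else subject
  steps.foldl (fun results step => results ++ [pvStepB s d step]) []

-- ===== PRECONDITION & SPEC =====
def Spec_generate_contextual_results_py (action : String) (subject : String) (device : String) (steps : List String) (out : List String) : Prop := out = generate_contextual_results_py_alt action subject device steps
instance (action : String) (subject : String) (device : String) (steps : List String) (out : List String) : Decidable (Spec_generate_contextual_results_py action subject device steps out) := by unfold Spec_generate_contextual_results_py; infer_instance

-- ===== CLAIM (what is proved, stated in full; the proofs are below) =====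
def Claim_equal_generate_contextual_results_py : Prop := ∀ (action : String) (subject : String) (device : String) (steps : List String), Dom_generate_contextual_results_py action subject device steps → Spec_generate_contextual_results_py action subject device steps (generate_contextual_results_py action subject device steps)

-- ===== LEMMAS AND PROOFS =====

-- first-match index over a keyword list (proof-side spec of A's chain)
def pvFirst (sl : List Char) : List (String × Nat) → Nat
  | [] => 18
  | (kw, p) :: t => if PySem.Chars.isIn kw.toList sl = true then p else pvFirst sl t

-- output lookup, as a function (to distribute over ifs)
def pvOut (s d : String) (n : Nat) : String :=
  (PySem.List.pyGet? (pvOutputs s d) (n : Int)).getD ""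

-- ---- guarded-min inner fold (over keywords at one position) ----
theorem pvInner_le (sl : List Char) (i : Nat) (l : List (String × Nat)) (b : Nat) :
    l.foldl (fun b kp => if kp.2 < b ∧ PySem.Chars.startswith (sl.drop i) kp.1.toList = true then kp.2 else b) b ≤ b := by
  induction l generalizing b with
  | nil => exact le_rfl
  | cons a t ih =>
    simp only [List.foldl_cons]
    split_ifs with h
    · exact le_trans (ih _) (le_of_lt h.1)
    · exact ih b

theorem pvInner_le_of (sl : List Char) (i : Nat) (l : List (String × Nat)) (b : Nat)
    (kp : String × Nat) (hm : kp ∈ l)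
    (hc : PySem.Chars.startswith (sl.drop i) kp.1.toList = true) :
    l.foldl (fun b kp => if kp.2 < b ∧ PySem.Chars.startswith (sl.drop i) kp.1.toList = true then kp.2 else b) b ≤ kp.2 := by
  induction l generalizing b with
  | nil => cases hm
  | cons a t ih =>
    simp only [List.foldl_cons]
    rcases List.mem_cons.mp hm with rfl | hmt
    · split_ifs with h
      · exact pvInner_le sl i t _
      · have hb : b ≤ kp.2 := Nat.le_of_not_lt (fun hlt => h ⟨hlt, hc⟩)
        exact le_trans (pvInner_le sl i t b) hb
    · split_ifs with h
      · exact ih _ hmt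
      · exact ih b hmt

theorem pvInner_cases (sl : List Char) (i : Nat) (l : List (String × Nat)) (b : Nat) :
    (l.foldl (fun b kp => if kp.2 < b ∧ PySem.Chars.startswith (sl.drop i) kp.1.toList = true then kp.2 else b) b = b)
    ∨ ∃ kp ∈ l, PySem.Chars.startswith (sl.drop i) kp.1.toList = true ∧
        l.foldl (fun b kp => if kp.2 < b ∧ PySem.Chars.startswith (sl.drop i) kp.1.toList = true then kp.2 else b) b = kp.2 := by
  induction l generalizing b with
  | nil => exact Or.inl rfl
  | cons a t ih =>
    simp only [List.foldl_cons]
    split_ifs with h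
    · rcases ih a.2 with he | ⟨kp, hmem, hc, he⟩
      · exact Or.inr ⟨a, List.mem_cons_self, h.2, he⟩
      · exact Or.inr ⟨kp, List.mem_cons_of_mem _ hmem, hc, he⟩
    · rcases ih b with he | ⟨kp, hmem, hc, he⟩
      · exact Or.inl he
      · exact Or.inr ⟨kp, List.mem_cons_of_mem _ hmem, hc, he⟩

-- ---- outer fold over positions (generic in the inner step) ----
theorem pvOuterG_le (g : Nat → Nat → Nat) (hg : ∀ b i, g b i ≤ b) (P : List Nat) (b : Nat) :
    P.foldl g b ≤ b := by
  induction P generalizing b with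
  | nil => exact le_rfl
  | cons a t ih => exact le_trans (ih (g b a)) (hg b a)

theorem pvOuterG_le_of (g : Nat → Nat → Nat) (hg : ∀ b i, g b i ≤ b)
    (P : List Nat) (b : Nat) (i : Nat) (hi : i ∈ P) (m : Nat) (hgi : ∀ b, g b i ≤ m) :
    P.foldl g b ≤ m := by
  induction P generalizing b with
  | nil => cases hi
  | cons a t ih =>
    rcases List.mem_cons.mp hi with rfl | hit
    · exact le_trans (pvOuterG_le g hg t _) (hgi b)
    · exact ih _ hit

theorem pvOuterG_cases (g : Nat → Nat → Nat) (Q : Nat → Nat → Prop)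
    (hcase : ∀ b i, g b i = b ∨ ∃ m, Q i m ∧ g b i = m) (P : List Nat) (b : Nat) :
    P.foldl g b = b ∨ ∃ i ∈ P, ∃ m, Q i m ∧ P.foldl g b = m := by
  induction P generalizing b with
  | nil => exact Or.inl rfl
  | cons a t ih =>
    rcases ih (g b a) with he | ⟨i, hit, m, hq, he⟩
    · rcases hcase b a with hb | ⟨m, hq, hb⟩
      · exact Or.inl (he.trans hb)
      · exact Or.inr ⟨a, List.mem_cons_self, m, hq, he.trans hb⟩
    · exact Or.inr ⟨i, List.mem_cons_of_mem _ hit, m, hq, he⟩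

-- occurrence at some scanned position ↔ substring membership (nonempty keyword)
theorem pvMatched_iff (sl : List Char) (kw : String) (hk : kw.toList ≠ []) :
    (∃ i ∈ List.range sl.length, PySem.Chars.startswith (sl.drop i) kw.toList = true)
    ↔ PySem.Chars.isIn kw.toList sl = true := by
  rw [← PySem.Chars.exists_prefix_drop_iff_isIn]
  constructor
  · rintro ⟨i, _, hc⟩
    exact ⟨i, (PySem.Chars.startswith_iff _ _).mp hc⟩
  · rintro ⟨j, hj⟩
    refine ⟨j, ?_, (PySem.Chars.startswith_iff _ _).mpr hj⟩
    rw [List.mem_range]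
    by_contra hge
    have : sl.drop j = [] := List.drop_eq_nil_of_le (Nat.le_of_not_lt hge)
    rw [this] at hj
    exact hk (List.prefix_nil.mp hj)

-- ---- first-match side ----
theorem pvFirst_le (sl : List Char) (l : List (String × Nat)) (h : ∀ kp ∈ l, kp.2 ≤ 18) :
    pvFirst sl l ≤ 18 := by
  induction l with
  | nil => exact le_rfl
  | cons a t ih =>
    obtain ⟨kw, p⟩ := a
    simp only [pvFirst]
    split_ifs
    · exact h (kw, p) List.mem_cons_self
    · exact ih fun kp hm => h kp (List.mem_cons_of_mem _ hm)

theorem pvFirst_le_of (sl : List Char) (l : List (String × Nat))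
    (hs : l.Pairwise (fun a b => a.2 ≤ b.2)) (kp : String × Nat) (hm : kp ∈ l)
    (hc : PySem.Chars.isIn kp.1.toList sl = true) : pvFirst sl l ≤ kp.2 := by
  induction l with
  | nil => cases hm
  | cons a t ih =>
    obtain ⟨kw, p⟩ := a
    simp only [pvFirst]
    rcases List.mem_cons.mp hm with rfl | hmt
    · simp only [hc, if_true]; exact le_rfl
    · split_ifs
      · exact (List.pairwise_cons.mp hs).1 kp hmt
      · exact ih (List.pairwise_cons.mp hs).2 hmt

theorem pvFirst_cases (sl : List Char) (l : List (String × Nat)) :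
    pvFirst sl l = 18 ∨ ∃ kp ∈ l, PySem.Chars.isIn kp.1.toList sl = true ∧ pvFirst sl l = kp.2 := by
  induction l with
  | nil => exact Or.inl rfl
  | cons a t ih =>
    obtain ⟨kw, p⟩ := a
    simp only [pvFirst]
    split_ifs with h
    · exact Or.inr ⟨(kw, p), List.mem_cons_self, h, rfl⟩
    · rcases ih with he | ⟨kp, hm, hc, he⟩
      · exact Or.inl he
      · exact Or.inr ⟨kp, List.mem_cons_of_mem _ hm, hc, he⟩

-- facts about the concrete keyword table
theorem pvKeywords_ne : ∀ kp ∈ pvKeywords, kp.1.toList ≠ [] := by decide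
theorem pvKeywords_le : ∀ kp ∈ pvKeywords, kp.2 ≤ 18 := by decide
theorem pvKeywords_sorted : pvKeywords.Pairwise (fun a b => a.2 ≤ b.2) := by decide

-- B's scan computes exactly the first-match index
theorem pvBest_eq_first (sl : List Char) : pvBest sl = pvFirst sl pvKeywords := by
  unfold pvBest
  have hg : ∀ (b i : Nat),
      pvKeywords.foldl (fun b kp => if kp.2 < b ∧ PySem.Chars.startswith (sl.drop i) kp.1.toList = true then kp.2 else b) b ≤ b :=
    fun b i => pvInner_le sl i pvKeywords b
  apply le_antisymm
  · rcases pvFirst_cases sl pvKeywords with he | ⟨kp, hm, hc, he⟩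
    · rw [he]; exact pvOuterG_le _ hg _ 18
    · rw [he]
      obtain ⟨i, hi, hstart⟩ := (pvMatched_iff sl kp.1 (pvKeywords_ne kp hm)).mpr hc
      exact pvOuterG_le_of _ hg _ 18 i hi kp.2 (fun b => pvInner_le_of sl i pvKeywords b kp hm hstart)
  · rcases pvOuterG_cases _
      (fun i m => ∃ kp ∈ pvKeywords, PySem.Chars.startswith (sl.drop i) kp.1.toList = true ∧ m = kp.2)
      (fun b i => by
        rcases pvInner_cases sl i pvKeywords b with hb | ⟨kp, hm, hc, hb⟩
        · exact Or.inl hb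
        · exact Or.inr ⟨kp.2, ⟨kp, hm, hc, rfl⟩, hb⟩)
      (List.range sl.length) 18 with he | ⟨i, hi, m, ⟨kp, hm, hc, rfl⟩, he⟩
    · rw [he]; exact pvFirst_le sl pvKeywords pvKeywords_le
    · rw [he]
      exact pvFirst_le_of sl pvKeywords pvKeywords_sorted kp hm
        ((pvMatched_iff sl kp.1 (pvKeywords_ne kp hm)).mp ⟨i, hi, hc⟩)

-- collapse a two-keyword OR group into two sequential ifs
theorem pv_ite_or {α : Type} (c1 c2 : Prop) [Decidable c1] [Decidable c2] (a b : α) :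
    (if c1 ∨ c2 then a else b) = if c1 then a else if c2 then a else b := by
  split_ifs <;> tauto

-- per-step agreement: A's chain equals the table lookup at the first-match index
set_option maxHeartbeats 1600000 in
theorem pvStep_eq (s d step : String) : pvStepA s d step = pvStepB s d step := by
  have h : pvStepB s d step
      = pvOut s d (pvFirst (PySem.Str.lower step).toList pvKeywords) := by
    unfold pvStepB pvOut
    rw [pvBest_eq_first]
  rw [h]
  unfold pvStepA
  simp only [pvKeywords, pvFirst]
  simp only [apply_ite (pvOut s d)]
  simp only [PySem.Str.isIn_eq, Bool.or_eq_true, pv_ite_or]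
  rfl

theorem pvFoldl_append (f : String → String) (steps : List String) (acc : List String) :
    steps.foldl (fun results step => results ++ [f step]) acc = acc ++ steps.map f := by
  induction steps generalizing acc with
  | nil => simp
  | cons h t ih => simp [List.foldl, ih]

-- ===== VERDICT (by name: the statement is the Claim_ definition above) =====
theorem generate_contextual_results_py_spec : Claim_equal_generate_contextual_results_py := by
  intro action subject device steps _
  unfold Spec_generate_contextual_results_py generate_contextual_results_py
    generate_contextual_results_py_alt
  rw [pvFoldl_append, pvFoldl_append]
  simp [pvStep_eq]
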